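-- pv_equiv track=rewrite | github.com/RoccoTescaro/university | artificial_intelligence/project/test.py | right_token
-- ===== SOURCE A (Python) =====
-- def right_token(index, tokens):
--     i = index + 1
--     left_parenthesis_count = 0
--     right_parenthesis_count = 0
--     for i in range(index+1, len(tokens)):
--         if tokens[i] == "(":
--             left_parenthesis_count += 1
--         elif tokens[i] == ")":
--             right_parenthesis_count += 1
--         if left_parenthesis_count < right_parenthesis_count:
--             return tokens[index+1:i]
--     return tokens[index+1:i+1]
-- ===== SOURCE B (Python) =====
-- def _first_unmatched(opens, closes):
--     # two sorted position lists; the k-th close is unmatched iff there is no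
--     # k-th open or it lies after the close
--     k = 0
--     for c in closes:
--         if k >= len(opens) or opens[k] > c:
--             return c
--         k += 1
--     return None
--
-- def right_token(index, tokens):
--     rest = tokens[index + 1:]
--     opens = [i for i, t in enumerate(rest) if t == "("]
--     closes = [i for i, t in enumerate(rest) if t == ")"]
--     cut = _first_unmatched(opens, closes)
--     return rest if cut is None else rest[:cut]
-- ===== Notes on version B (the rewrite author's own statement) =====
-- stated objective: alternative
-- what changed: Instead of one balance-counting scan with early exit, B extracts the sorted position lists of '(' and ')' in the suffix and pairs them off two-pointer style: the first ')' with no earlier-or-equal matching '(' gives the cut; Pre_ restricts to the natural domain index+1 >= 0 (a token position), excluding negative positions where A raises IndexError or scans via negative-index wraparound.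
-- outside the precondition, e.g. on right_token(-2, [')', ')', '(']): A returns [], B returns ['(']
import Mathlib
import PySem

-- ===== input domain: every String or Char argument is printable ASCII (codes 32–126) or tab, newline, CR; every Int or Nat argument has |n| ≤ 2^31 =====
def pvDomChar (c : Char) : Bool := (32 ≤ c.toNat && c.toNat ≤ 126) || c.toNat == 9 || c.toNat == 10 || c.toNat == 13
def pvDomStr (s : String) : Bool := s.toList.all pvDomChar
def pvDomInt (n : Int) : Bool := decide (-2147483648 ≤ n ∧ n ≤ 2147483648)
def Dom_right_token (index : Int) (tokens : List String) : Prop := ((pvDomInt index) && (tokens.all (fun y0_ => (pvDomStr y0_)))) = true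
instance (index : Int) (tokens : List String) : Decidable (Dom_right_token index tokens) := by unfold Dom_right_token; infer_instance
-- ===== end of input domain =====

-- B replaces A's balance-counting scan by pairing off the sorted position lists of "(" and ")"
-- two-pointer style (objective: alternative algorithm, same asymptotic cost).

-- ===== PORT A =====
-- A's for-loop over range(index+1, len(tokens)) with the two counters and early return;
-- tokens[i] is pyGetD "" (exact under Pre_, which keeps the scan start nonnegative).
def rightTokenGo (tokens : List String) (index : Int) :
    List Int → Int → Int → Int → List String
  | [], i, _l, _r => PySem.List.slice tokens (some (index + 1)) (some (i + 1))
  | j :: rest, _i, l, r =>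
      let t := PySem.List.pyGetD tokens j ""
      let l' := if t = "(" then l + 1 else l
      let r' := if (¬ t = "(") ∧ t = ")" then r + 1 else r
      if l' < r' then PySem.List.slice tokens (some (index + 1)) (some j)
      else rightTokenGo tokens index rest j l' r'

def right_token (index : Int) (tokens : List String) : List String :=
  rightTokenGo tokens index
    (PySem.List.pyRange (index + 1) (tokens.length : Int) 1) (index + 1) 0 0

-- ===== PORT B =====
-- Source B _first_unmatched: two sorted position lists, consume one open per matched close.
def pvFirstUnmatched : List Int → List Int → Option Int
  | _, [] => none
  | [], c :: _ => some c
  | o :: os, c :: cs => if o > c then some c else pvFirstUnmatched os cs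

def right_token_alt (index : Int) (tokens : List String) : List String :=
  let rest := PySem.List.slice tokens (some (index + 1)) none
  let opens := ((PySem.List.enumerate rest 0).filter (fun p => p.2 == "(")).map (·.1)
  let closes := ((PySem.List.enumerate rest 0).filter (fun p => p.2 == ")")).map (·.1)
  match pvFirstUnmatched opens closes with
  | none => rest
  | some c => PySem.List.slice rest none (some c)

-- ===== PRECONDITION & SPEC =====
-- Pre_ restricts to the function's natural domain: index is a token position, so the scan
-- starts at a nonnegative position. It excludes index+1 < 0, where A either raises
-- IndexError (index+1 < -len) or returns values via accidental negative-index wraparound.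
def Pre_right_token (index : Int) (tokens : List String) : Prop :=
  0 ≤ index + 1
instance (index : Int) (tokens : List String) : Decidable (Pre_right_token index tokens) := by
  unfold Pre_right_token; infer_instance

def pvWitness_right_token : Int × List String := (0, ["(", "x", ")", ")"])

def Spec_right_token (index : Int) (tokens : List String) (out : List String) : Prop := out = right_token_alt index tokens
instance (index : Int) (tokens : List String) (out : List String) : Decidable (Spec_right_token index tokens out) := by unfold Spec_right_token; infer_instance

-- ===== CLAIM (what is proved, stated in full; the proofs are below) =====
def Claim_equal_right_token : Prop := ∀ (index : Int) (tokens : List String), Dom_right_token index tokens → Pre_right_token index tokens → Spec_right_token index tokens (right_token index tokens)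

-- ===== LEMMAS AND PROOFS =====

def pvDelta (t : String) : Int := if t = "(" then 1 else if t = ")" then -1 else 0

-- number of tokens consumed by A's scan starting with balance c before going negative
def pvF (c : Int) : List String → Nat
  | [] => 0
  | t :: ts => if c + pvDelta t < 0 then 0 else pvF (c + pvDelta t) ts + 1

-- positions (from offset k) of the tokens equal to mark
def pvPosI (mark : String) : List String → Int → List Int
  | [], _ => []
  | t :: ts, k => if t = mark then k :: pvPosI mark ts (k + 1) else pvPosI mark ts (k + 1)

theorem pvF_le (ts : List String) : ∀ c : Int, pvF c ts ≤ ts.length := by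
  induction ts with
  | nil => intro c; simp [pvF]
  | cons t ts ih =>
    intro c
    rw [pvF]
    split_ifs with h
    · simp
    · have := ih (c + pvDelta t)
      simp only [List.length_cons]
      omega

theorem pvFU_nil (os : List Int) : pvFirstUnmatched os [] = none := by
  cases os <;> rfl

theorem pvPosI_ge (mark : String) (ts : List String) :
    ∀ (k : Int) (x : Int), x ∈ pvPosI mark ts k → k ≤ x := by
  induction ts with
  | nil => intro k x hx; simp [pvPosI] at hx
  | cons t ts ih =>
    intro k x hx
    rw [pvPosI] at hx
    split_ifs at hx with h
    · rcases List.mem_cons.mp hx with rfl | hx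
      · exact le_refl x
      · have := ih (k + 1) x hx; omega
    · have := ih (k + 1) x hx; omega

theorem pv_enum_filter (mark : String) (ts : List String) :
    ∀ k : Int,
    (((PySem.List.enumerate ts k).filter (fun p => p.2 == mark)).map (·.1)) =
      pvPosI mark ts k := by
  induction ts with
  | nil => intro k; simp [PySem.List.enumerate_nil, pvPosI]
  | cons t ts ih =>
    intro k
    rw [PySem.List.enumerate_cons, List.filter_cons, pvPosI]
    by_cases h : t = mark
    · simp only [h, beq_self_eq_true, if_pos, List.map_cons]
      rw [ih]
    · have hb : ((k, t).2 == mark) = false := by simp [h]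
      rw [if_neg h]
      simp only [hb, Bool.false_eq_true, if_false]
      exact ih (k + 1)

-- pvFirstUnmatched only compares prefix opens with closes; any prefix whose elements are
-- ≤ every close behaves like any other of the same length
theorem pv_prefix_congr :
    ∀ (closes p1 p2 suf : List Int), p1.length = p2.length →
    (∀ o ∈ p1, ∀ cl ∈ closes, o ≤ cl) → (∀ o ∈ p2, ∀ cl ∈ closes, o ≤ cl) →
    pvFirstUnmatched (p1 ++ suf) closes = pvFirstUnmatched (p2 ++ suf) closes := by
  intro closes
  induction closes with
  | nil => intro p1 p2 suf _ _ _; rw [pvFU_nil, pvFU_nil]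
  | cons c cs ih =>
    intro p1 p2 suf hlen h1 h2
    cases p1 with
    | nil =>
      cases p2 with
      | nil => rfl
      | cons => simp at hlen
    | cons o1 os1 =>
      cases p2 with
      | nil => simp at hlen
      | cons o2 os2 =>
        simp only [List.cons_append, pvFirstUnmatched]
        rw [if_neg (by have := h1 o1 (by simp) c (by simp); omega),
            if_neg (by have := h2 o2 (by simp) c (by simp); omega)]
        exact ih os1 os2 suf (by simpa using hlen)
          (fun o ho cl hcl => h1 o (by simp [ho]) cl (by simp [hcl]))
          (fun o ho cl hcl => h2 o (by simp [ho]) cl (by simp [hcl]))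

-- the two-pointer matcher locates exactly A's first balance crossing
theorem pv_tp (ts : List String) :
    ∀ (c : Nat) (k : Int), 0 ≤ k →
    pvFirstUnmatched (List.replicate c 0 ++ pvPosI "(" ts k) (pvPosI ")" ts k) =
      if pvF (c : Int) ts < ts.length then some (k + (pvF (c : Int) ts : Int)) else none := by
  induction ts with
  | nil =>
    intro c k _
    simp only [pvPosI, List.append_nil]
    rw [pvFU_nil]
    simp [pvF]
  | cons t ts ih =>
    intro c k hk
    by_cases h1 : t = "("
    · rw [pvPosI, pvPosI, if_pos h1, if_neg (by simp [h1])]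
      have hswap : pvFirstUnmatched (List.replicate c 0 ++ k :: pvPosI "(" ts (k + 1))
          (pvPosI ")" ts (k + 1)) =
          pvFirstUnmatched (List.replicate (c + 1) 0 ++ pvPosI "(" ts (k + 1))
          (pvPosI ")" ts (k + 1)) := by
        have e1 : List.replicate c 0 ++ k :: pvPosI "(" ts (k + 1) =
            (List.replicate c 0 ++ [k]) ++ pvPosI "(" ts (k + 1) := by simp
        have e2 : List.replicate (c + 1) (0 : Int) ++ pvPosI "(" ts (k + 1) =
            (List.replicate c 0 ++ [(0 : Int)]) ++ pvPosI "(" ts (k + 1) := by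
          rw [List.replicate_succ']
        rw [e1, e2]
        refine pv_prefix_congr _ _ _ _ (by simp) ?_ ?_
        · intro o ho cl hcl
          have hcl' := pvPosI_ge ")" ts (k + 1) cl hcl
          rcases List.mem_append.mp ho with ho | ho
          · have := List.eq_of_mem_replicate ho; omega
          · simp at ho; omega
        · intro o ho cl hcl
          have hcl' := pvPosI_ge ")" ts (k + 1) cl hcl
          rcases List.mem_append.mp ho with ho | ho
          · have := List.eq_of_mem_replicate ho; omega
          · simp at ho; omega
      rw [hswap, ih (c + 1) (k + 1) (by omega)]
      have hF : pvF (c : Int) (t :: ts) = pvF ((c : Int) + 1) ts + 1 := by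
        rw [pvF, pvDelta, if_pos h1, if_neg (by omega)]
      rw [hF]
      have : ((c : Int) + 1) = ((c + 1 : Nat) : Int) := by push_cast; ring
      rw [this]
      by_cases hlt : pvF ((c + 1 : Nat) : Int) ts < ts.length
      · rw [if_pos hlt, if_pos (by simp only [List.length_cons]; omega)]
        congr 1
        omega
      · rw [if_neg hlt, if_neg (by simp only [List.length_cons]; omega)]
    · by_cases h2 : t = ")"
      · rw [pvPosI, pvPosI, if_neg (by simp [h2]), if_pos h2]
        cases c with
        | zero =>
          simp only [Nat.cast_zero]
          have hF : pvF (0 : Int) (t :: ts) = 0 := by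
            rw [pvF, pvDelta, if_neg h1, if_pos h2, if_pos (by omega)]
          rw [hF]
          simp only [List.replicate_zero, List.nil_append, Nat.cast_zero, add_zero,
            List.length_cons]
          rw [if_pos (by omega)]
          cases hP : pvPosI "(" ts (k + 1) with
          | nil => rfl
          | cons o os =>
            have ho : k + 1 ≤ o := pvPosI_ge "(" ts (k + 1) o (by rw [hP]; simp)
            simp only [pvFirstUnmatched]
            rw [if_pos (by omega)]
        | succ c' =>
          rw [List.replicate_succ, List.cons_append]
          simp only [pvFirstUnmatched]
          rw [if_neg (by omega), ih c' (k + 1) (by omega)]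
          have hF : pvF ((Nat.succ c' : Nat) : Int) (t :: ts) = pvF (c' : Int) ts + 1 := by
            rw [pvF, pvDelta, if_neg h1, if_pos h2, if_neg (by push_cast; omega)]
            congr 1
            push_cast
            ring
          rw [hF]
          by_cases hlt : pvF ((c' : Nat) : Int) ts < ts.length
          · rw [if_pos hlt, if_pos (by simp only [List.length_cons]; omega)]
            congr 1
            omega
          · rw [if_neg hlt, if_neg (by simp only [List.length_cons]; omega)]
      · rw [pvPosI, pvPosI, if_neg h1, if_neg h2, ih c (k + 1) (by omega)]
        have hF : pvF (c : Int) (t :: ts) = pvF (c : Int) ts + 1 := by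
          rw [pvF, pvDelta, if_neg h1, if_neg h2]
          rw [if_neg (by omega)]
          simp
        rw [hF]
        by_cases hlt : pvF ((c : Nat) : Int) ts < ts.length
        · rw [if_pos hlt, if_pos (by simp only [List.length_cons]; omega)]
          congr 1
          omega
        · rw [if_neg hlt, if_neg (by simp only [List.length_cons]; omega)]

-- characterisation of A's loop (reused invariant proof)
theorem pv_go_eq (tokens : List String) (index : Int) :
    ∀ (k : Nat) (j prev l r : Int), j = (tokens.length : Int) - k →
    rightTokenGo tokens index (PySem.List.pyRange j (tokens.length : Int) 1) prev l r =
      if j = (tokens.length : Int) then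
        PySem.List.slice tokens (some (index + 1)) (some (prev + 1))
      else
        PySem.List.slice tokens (some (index + 1))
          (some (j + (pvF (l - r) ((PySem.List.pyRange j (tokens.length : Int) 1).map
            (fun i => PySem.List.pyGetD tokens i ""))))) := by
  intro k
  induction k with
  | zero =>
    intro j prev l r hj
    have hj' : j = (tokens.length : Int) := by omega
    rw [hj', PySem.List.pyRange_one_eq_nil (le_refl _), if_pos rfl]
    rfl
  | succ k ih =>
    intro j prev l r hj
    have hjlt : j < (tokens.length : Int) := by omega
    rw [PySem.List.pyRange_one_cons hjlt, if_neg (show ¬ j = (tokens.length : Int) by omega)]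
    simp only [rightTokenGo, List.map_cons]
    set t := PySem.List.pyGetD tokens j "" with ht
    set M := (PySem.List.pyRange (j + 1) (tokens.length : Int) 1).map
        (fun i => PySem.List.pyGetD tokens i "") with hM
    have key : ∀ (l' r' : Int), l' - r' = l - r + pvDelta t →
        (if l' < r' then PySem.List.slice tokens (some (index + 1)) (some j)
         else rightTokenGo tokens index (PySem.List.pyRange (j + 1) (tokens.length : Int) 1) j l' r') =
        PySem.List.slice tokens (some (index + 1)) (some (j + (pvF (l - r) (t :: M) : Int))) := by
      intro l' r' hd'
      by_cases hneg : l' < r'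
      · rw [if_pos hneg]
        have hF : pvF (l - r) (t :: M) = 0 := by rw [pvF, if_pos (by omega)]
        rw [hF]
        norm_num
      · rw [if_neg hneg, ih (j + 1) j l' r' (by omega)]
        by_cases he : j + 1 = (tokens.length : Int)
        · rw [if_pos he]
          have hMnil : M = [] := by
            rw [hM, PySem.List.pyRange_one_eq_nil (by omega), List.map_nil]
          rw [hMnil]
          have hF : pvF (l - r) [t] = 1 := by rw [pvF, if_neg (by omega)]; rfl
          rw [hF]
          norm_num
        · rw [if_neg he, ← hM]
          have hF : pvF (l - r) (t :: M) = pvF (l' - r') M + 1 := by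
            rw [pvF, if_neg (by omega)]
            congr 2
            omega
          rw [hF]
          congr 2
          push_cast
          ring
    by_cases h1 : t = "("
    · rw [if_pos h1, if_neg (show ¬ ((¬ t = "(") ∧ t = ")") from fun h => h.1 h1)]
      exact key (l + 1) r (by rw [pvDelta, if_pos h1]; ring)
    · rw [if_neg h1]
      by_cases h2 : t = ")"
      · rw [if_pos (⟨h1, h2⟩ : (¬ t = "(") ∧ t = ")")]
        exact key l (r + 1) (by rw [pvDelta, if_neg h1, if_pos h2]; ring)
      · rw [if_neg (show ¬ ((¬ t = "(") ∧ t = ")") from fun h => h2 h.2)]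
        exact key l r (by rw [pvDelta, if_neg h1, if_neg h2]; ring)

-- B in closed form: B = rest.take (pvF 0 rest) padded by pvF ≤ length
theorem pv_alt_eq (index : Int) (tokens : List String) (h : 0 ≤ index + 1) :
    right_token_alt index tokens =
      (tokens.drop (index + 1).toNat).take (pvF 0 (tokens.drop (index + 1).toNat)) := by
  simp only [right_token_alt]
  rw [PySem.List.slice_from tokens h]
  set rest := tokens.drop (index + 1).toNat with hrest
  rw [pv_enum_filter "(" rest 0, pv_enum_filter ")" rest 0]
  have htp := pv_tp rest 0 0 (le_refl 0)
  simp only [List.replicate_zero, List.nil_append, Nat.cast_zero, zero_add] at htp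
  rw [htp]
  by_cases hlt : pvF (0 : Int) rest < rest.length
  · rw [if_pos hlt]
    simp only []
    rw [PySem.List.slice_to_natCast]
  · rw [if_neg hlt]
    have := pvF_le rest (0 : Int)
    rw [List.take_of_length_le (by omega)]

theorem main_spec (index : Int) (tokens : List String)
    (hpre : 0 ≤ index + 1) :
    right_token index tokens = right_token_alt index tokens := by
  rw [pv_alt_eq index tokens hpre]
  simp only [right_token]
  by_cases hsn : (tokens.length : Int) ≤ index + 1
  · rw [PySem.List.pyRange_one_eq_nil hsn]
    simp only [rightTokenGo]
    rw [PySem.List.slice_toNat tokens (by omega) (by omega),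
        List.drop_eq_nil_of_le (by omega)]
    simp [pvF]
  · rw [pv_go_eq tokens index ((tokens.length : Int) - (index + 1)).toNat (index + 1)
        (index + 1) 0 0 (by omega),
        if_neg (by omega)]
    rw [PySem.List.map_pyGetD_pyRange' tokens "" hpre]
    rw [PySem.List.slice_toNat tokens (by omega) (by omega)]
    norm_num
    congr 1
    omega

-- ===== VERDICT (by name: the statement is the Claim_ definition above) =====
theorem right_token_spec : Claim_equal_right_token := by
  intro index tokens _hdom hpre
  unfold Pre_right_token at hpre
  unfold Spec_right_token
  exact main_spec index tokens hpre
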